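-- pv_equiv track=rewrite | github.com/seanllrd-old/monty-python | main.py | display_doors
-- ===== SOURCE A (Python) =====
-- def display_doors(doors: list, revealed_door_nums: list = []) -> str:
--     door_display = ''
--     for door_num in range(len(doors)):
--         if door_num in revealed_door_nums:
--             door_prize = doors[door_num].title()
--             if len(revealed_door_nums) < len(doors):
--                 door_display += f"|{' . '}{door_prize}{' . '}| "
--             else:
--                 door_display += f"| {door_prize}{'  ' if door_prize == 'Car' else ' '}| "
--         else:
--             door_display += f"| Door {door_num + 1:03} | "
--         if (door_num + 1) % 10 == 0:
--             door_display = door_display[:-1] + "\n"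
--     return door_display
-- ===== SOURCE B (Python) =====
-- def display_doors(doors: list, revealed_door_nums: list = []) -> str:
--     hidden_remain = len(revealed_door_nums) < len(doors)
--
--     def cell(i):
--         if i in revealed_door_nums:
--             prize = doors[i].title()
--             if hidden_remain:
--                 return "| . " + prize + " . | "
--             return "| " + prize + ("  " if prize == "Car" else " ") + "| "
--         return "| Door %03d | " % (i + 1)
--
--     cells = [cell(i) for i in range(len(doors))]
--     rows = []
--     while cells:
--         row, cells = cells[:10], cells[10:]
--         joined = "".join(row)
--         rows.append(joined[:-1] + "\n" if len(row) == 10 else joined)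
--     return "".join(rows)
-- ===== Notes on version B (the rewrite author's own statement) =====
-- stated objective: alternative
-- what changed: A appends to one display string and patches its last character at every tenth door; B first builds the list of per-door cell strings in one pass, then peels it into rows of ten, turning each full row's trailing space into a newline before concatenating.
import Mathlib
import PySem

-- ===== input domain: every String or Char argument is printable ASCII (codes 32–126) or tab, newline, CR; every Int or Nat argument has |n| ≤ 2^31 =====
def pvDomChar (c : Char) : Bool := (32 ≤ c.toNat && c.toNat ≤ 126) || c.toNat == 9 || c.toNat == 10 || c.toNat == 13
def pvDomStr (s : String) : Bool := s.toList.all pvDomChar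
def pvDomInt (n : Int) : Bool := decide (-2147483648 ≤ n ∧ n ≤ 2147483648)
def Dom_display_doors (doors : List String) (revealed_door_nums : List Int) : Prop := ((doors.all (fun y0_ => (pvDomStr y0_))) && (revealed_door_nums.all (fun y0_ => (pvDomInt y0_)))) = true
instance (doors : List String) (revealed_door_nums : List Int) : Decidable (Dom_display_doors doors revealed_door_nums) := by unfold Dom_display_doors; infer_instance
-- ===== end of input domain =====

-- B rebuilds the display in two passes (per-door cells, then rows of ten) instead of A's
-- single fold that patches its accumulated string at every tenth door; same output, objective: alternative.

-- str.title(), ported by hand (exact on the ASCII domain: a character is cased iff it is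
-- an ASCII letter); used by both ports since both Pythons call doors[i].title().
def pyTitle : Bool → List Char → List Char
  | _, [] => []
  | prevCased, c :: cs =>
    if PySem.Chars.isalpha c then
      (if prevCased then PySem.Chars.lowerChar c else PySem.Chars.upperChar c) :: pyTitle true cs
    else
      c :: pyTitle false cs

-- ===== PORT A =====
-- literal transliteration of A: one fold over range(len(doors)); the accumulated string is
-- kept as List Char (s[:-1] = dropLast) and packed into a String at the end.
def display_doors (doors : List String) (revealed_door_nums : List Int) : String :=
  let door_display :=
    (PySem.List.pyRange 0 (doors.length : Int) 1).foldl (fun acc door_num =>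
      let acc' :=
        if door_num ∈ revealed_door_nums then
          let door_prize := pyTitle false (PySem.List.pyGetD doors door_num "").toList
          if revealed_door_nums.length < doors.length then
            acc ++ ("| . ".toList ++ door_prize ++ " . | ".toList)
          else
            acc ++ ("| ".toList ++ door_prize ++
                    (if door_prize = "Car".toList then "  ".toList else " ".toList) ++ "| ".toList)
        else
          acc ++ ("| Door ".toList ++ PySem.Chars.zfill (PySem.Int.toChars (door_num + 1)) 3 ++ " | ".toList)
      if PySem.Int.mod (door_num + 1) 10 == 0 then acc'.dropLast ++ ['\n'] else acc') []
  String.ofList door_display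

-- ===== PORT B =====
def cellB (doors : List String) (revealed_door_nums : List Int) (hidden_remain : Bool) (i : Int) : List Char :=
  if i ∈ revealed_door_nums then
    let prize := pyTitle false (PySem.List.pyGetD doors i "").toList
    if hidden_remain then
      "| . ".toList ++ prize ++ " . | ".toList
    else
      "| ".toList ++ prize ++ (if prize = "Car".toList then "  ".toList else " ".toList) ++ "| ".toList
  else
    "| Door ".toList ++ PySem.Chars.zfill (PySem.Int.toChars (i + 1)) 3 ++ " | ".toList

-- the while-loop of B: peel off rows of ten cells; a full row's join loses its last char for '\n'
def rowsGo : List (List Char) → List Char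
  | [] => []
  | c :: cs =>
    let row := (c :: cs).take 10
    let rest := (c :: cs).drop 10
    (if row.length == 10 then row.flatten.dropLast ++ ['\n'] else row.flatten) ++ rowsGo rest
termination_by cs => cs.length
decreasing_by simp

def display_doors_alt (doors : List String) (revealed_door_nums : List Int) : String :=
  let hidden_remain := decide (revealed_door_nums.length < doors.length)
  let cells := (PySem.List.pyRange 0 (doors.length : Int) 1).map (cellB doors revealed_door_nums hidden_remain)
  String.ofList (rowsGo cells)

-- ===== PRECONDITION & SPEC =====
def Spec_display_doors (doors : List String) (revealed_door_nums : List Int) (out : String) : Prop := out = display_doors_alt doors revealed_door_nums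
instance (doors : List String) (revealed_door_nums : List Int) (out : String) : Decidable (Spec_display_doors doors revealed_door_nums out) := by unfold Spec_display_doors; infer_instance

-- ===== CLAIM (what is proved, stated in full; the proofs are below) =====
def Claim_equal_display_doors : Prop := ∀ (doors : List String) (revealed_door_nums : List Int), Dom_display_doors doors revealed_door_nums → Spec_display_doors doors revealed_door_nums (display_doors doors revealed_door_nums)

-- ===== LEMMAS AND PROOFS =====

-- common normal form: the k-th cell, with every cell at an index ≡ 9 (mod 10) patched
def specGo (cell : Nat → List Char) : Nat → Nat → List Char
  | _, 0 => []
  | k, n + 1 =>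
    (if (k + 1) % 10 == 0 then (cell k).dropLast ++ ['\n'] else cell k) ++ specGo cell (k + 1) n

theorem cellB_ne_nil (doors : List String) (revealed_door_nums : List Int) (h : Bool) (i : Int) :
    cellB doors revealed_door_nums h i ≠ [] := by
  unfold cellB
  split_ifs <;> simp

theorem specGo_succ (cell : Nat → List Char) (k n : Nat) :
    specGo cell k (n + 1)
      = (if (k + 1) % 10 == 0 then (cell k).dropLast ++ ['\n'] else cell k) ++ specGo cell (k + 1) n := rfl

theorem specGo_append (cell : Nat → List Char) (m n k : Nat) :
    specGo cell k (m + n) = specGo cell k m ++ specGo cell (k + m) n := by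
  induction m generalizing k with
  | zero => simp [specGo]
  | succ m ih =>
      have h : m + 1 + n = (m + n) + 1 := by omega
      rw [h, specGo_succ, specGo_succ, ih (k + 1)]
      have h2 : k + 1 + m = k + (m + 1) := by omega
      rw [h2, List.append_assoc]

theorem spec_full (cell : Nat → List Char) (hc : ∀ j, cell j ≠ []) :
    ∀ n k, 0 < n → (k + n) % 10 = 0 → (∀ j, j + 1 < n → (k + j + 1) % 10 ≠ 0) →
      specGo cell k n = ((List.range' k n).map cell).flatten.dropLast ++ ['\n'] := by
  intro n
  induction n with
  | zero => omega
  | succ m ih =>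
      intro k _ hmod hno
      rw [specGo_succ]
      cases m with
      | zero =>
          have h1 : (k + 1) % 10 = 0 := by omega
          simp [specGo, h1, List.range']
      | succ m' =>
          have h1 : (k + 1) % 10 ≠ 0 := hno 0 (by omega)
          have h1' : ((k + 1) % 10 == 0) = false := by simpa using h1
          have hflat : ((List.range' (k + 1) (m' + 1)).map cell).flatten ≠ [] := by
            simp only [List.range', List.map_cons, List.flatten_cons]
            intro h
            exact hc (k + 1) (List.append_eq_nil_iff.mp h).1
          rw [h1']
          simp only [Bool.false_eq_true, if_false]
          rw [ih (k + 1) (by omega) (by omega) (fun j hj => by have := hno (j + 1) (by omega); omega)]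
          have hr : List.range' k (m' + 1 + 1) = k :: List.range' (k + 1) (m' + 1) := rfl
          rw [hr, List.map_cons, List.flatten_cons,
            List.dropLast_append_of_ne_nil hflat, List.append_assoc]

theorem spec_partial (cell : Nat → List Char) :
    ∀ n k, (∀ j, j < n → (k + j + 1) % 10 ≠ 0) →
      specGo cell k n = ((List.range' k n).map cell).flatten := by
  intro n
  induction n with
  | zero => simp [specGo]
  | succ m ih =>
      intro k hno
      have h1 : (k + 1) % 10 ≠ 0 := by have := hno 0 (by omega); omega
      have h1' : ((k + 1) % 10 == 0) = false := by simpa using h1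
      rw [specGo_succ, h1']
      simp only [Bool.false_eq_true, if_false]
      have hr : List.range' k (m + 1) = k :: List.range' (k + 1) m := rfl
      rw [hr, List.map_cons, List.flatten_cons,
        ih (k + 1) (fun j hj => by have := hno (j + 1) (by omega); omega)]

theorem rowsGo_eq (cell : Nat → List Char) (hc : ∀ j, cell j ≠ []) :
    ∀ n k, k % 10 = 0 → rowsGo ((List.range' k n).map cell) = specGo cell k n := by
  intro n
  induction n using Nat.strong_induction_on with
  | _ n ih =>
      intro k hk
      rcases n with _ | n'
      · simp [rowsGo, specGo]
      · have hne : (List.range' k (n' + 1)).map cell ≠ [] := by simp [List.range']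
        obtain ⟨c, cs, hcs⟩ := List.exists_cons_of_ne_nil hne
        rw [hcs, rowsGo, ← hcs]
        by_cases hbig : 10 ≤ n' + 1
        · have hsplit : List.range' k (n' + 1) = List.range' k 10 ++ List.range' (k + 10) (n' + 1 - 10) := by
            rw [List.range'_append]
            congr 1
            omega
          have hlen : ((List.range' k 10).map cell).length = 10 := by simp
          rw [hsplit, List.map_append,
            List.take_append_of_le_length (by simp), List.drop_append_of_le_length (by simp),
            List.take_of_length_le (le_of_eq hlen), List.drop_of_length_le (le_of_eq hlen),
            List.nil_append, hlen]
          simp only [beq_self_eq_true, if_true]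
          rw [ih (n' + 1 - 10) (by omega) (k + 10) (by omega)]
          have h10 : n' + 1 = 10 + (n' + 1 - 10) := by omega
          rw [show specGo cell k (n' + 1) = specGo cell k (10 + (n' + 1 - 10)) from by rw [← h10],
            specGo_append]
          congr 1
          rw [spec_full cell hc 10 k (by omega) (by omega) (fun j hj => by omega)]
        · have hlen : ((List.range' k (n' + 1)).map cell).length = n' + 1 := by simp
          rw [List.take_of_length_le (by omega), List.drop_of_length_le (by omega), hlen]
          have hne10 : (n' + 1 == 10) = false := by simp; omega
          rw [hne10]
          simp only [Bool.false_eq_true, if_false]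
          have h0 : rowsGo ([] : List (List Char)) = [] := by simp [rowsGo]
          rw [h0, List.append_nil]
          rw [spec_partial cell (n' + 1) k (fun j hj => by omega)]

theorem foldA_eq (doors : List String) (revealed_door_nums : List Int) :
    ∀ (n k : Nat) (acc : List Char),
      (PySem.List.pyRange (k : Int) ((k : Int) + (n : Int)) 1).foldl (fun acc door_num =>
        let acc' :=
          if door_num ∈ revealed_door_nums then
            let door_prize := pyTitle false (PySem.List.pyGetD doors door_num "").toList
            if revealed_door_nums.length < doors.length then
              acc ++ ("| . ".toList ++ door_prize ++ " . | ".toList)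
            else
              acc ++ ("| ".toList ++ door_prize ++
                      (if door_prize = "Car".toList then "  ".toList else " ".toList) ++ "| ".toList)
          else
            acc ++ ("| Door ".toList ++ PySem.Chars.zfill (PySem.Int.toChars (door_num + 1)) 3 ++ " | ".toList)
        if PySem.Int.mod (door_num + 1) 10 == 0 then acc'.dropLast ++ ['\n'] else acc') acc
      = acc ++ specGo (fun j => cellB doors revealed_door_nums
            (decide (revealed_door_nums.length < doors.length)) (j : Int)) k n := by
  intro n
  induction n with
  | zero =>
      intro k acc
      rw [PySem.List.pyRange_one_eq_nil (by omega)]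
      simp [specGo]
  | succ m ih =>
      intro k acc
      rw [PySem.List.pyRange_one_cons (by push_cast; omega)]
      simp only [List.foldl_cons]
      have hrange : PySem.List.pyRange ((k : Int) + 1) ((k : Int) + ((m : Nat) + 1 : Nat)) 1
          = PySem.List.pyRange (((k + 1 : Nat) : Int)) (((k + 1 : Nat) : Int) + ((m : Nat) : Int)) 1 := by
        congr 1
        push_cast
        ring
      rw [hrange, ih (k + 1)]
      -- the step itself: acc ++ (patched cell k)
      have hmod : (PySem.Int.mod ((k : Int) + 1) 10 == 0) = ((k + 1) % 10 == 0) := by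
        rw [show ((k : Int) + 1) = ((k + 1 : Nat) : Int) by push_cast; ring,
          show (10 : Int) = ((10 : Nat) : Int) from rfl, PySem.Int.mod_natCast]
        simp
        omega
      have hstep :
          (let acc' :=
            if (k : Int) ∈ revealed_door_nums then
              let door_prize := pyTitle false (PySem.List.pyGetD doors (k : Int) "").toList
              if revealed_door_nums.length < doors.length then
                acc ++ ("| . ".toList ++ door_prize ++ " . | ".toList)
              else
                acc ++ ("| ".toList ++ door_prize ++
                        (if door_prize = "Car".toList then "  ".toList else " ".toList) ++ "| ".toList)
            else
              acc ++ ("| Door ".toList ++ PySem.Chars.zfill (PySem.Int.toChars ((k : Int) + 1)) 3 ++ " | ".toList)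
          if PySem.Int.mod ((k : Int) + 1) 10 == 0 then acc'.dropLast ++ ['\n'] else acc')
          = acc ++ (if (k + 1) % 10 == 0 then
              (cellB doors revealed_door_nums (decide (revealed_door_nums.length < doors.length)) (k : Int)).dropLast ++ ['\n']
            else cellB doors revealed_door_nums (decide (revealed_door_nums.length < doors.length)) (k : Int)) := by
        have hacc' :
            (if (k : Int) ∈ revealed_door_nums then
              let door_prize := pyTitle false (PySem.List.pyGetD doors (k : Int) "").toList
              if revealed_door_nums.length < doors.length then
                acc ++ ("| . ".toList ++ door_prize ++ " . | ".toList)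
              else
                acc ++ ("| ".toList ++ door_prize ++
                        (if door_prize = "Car".toList then "  ".toList else " ".toList) ++ "| ".toList)
            else
              acc ++ ("| Door ".toList ++ PySem.Chars.zfill (PySem.Int.toChars ((k : Int) + 1)) 3 ++ " | ".toList))
            = acc ++ cellB doors revealed_door_nums (decide (revealed_door_nums.length < doors.length)) (k : Int) := by
          unfold cellB
          simp only [decide_eq_true_eq]
          split_ifs <;> rfl
        simp only [hacc', hmod]
        split_ifs with h
        · rw [List.dropLast_append_of_ne_nil (cellB_ne_nil _ _ _ _), List.append_assoc]
        · rfl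
      rw [hstep, List.append_assoc, specGo_succ]

theorem cells_eq (doors : List String) (revealed_door_nums : List Int) (h : Bool) :
    (PySem.List.pyRange 0 (doors.length : Int) 1).map (cellB doors revealed_door_nums h)
      = List.map (fun j : Nat => cellB doors revealed_door_nums h (j : Int)) (List.range' 0 doors.length) := by
  rw [PySem.List.pyRange_one]
  have ht : ((doors.length : Int) - 0).toNat = doors.length := by omega
  rw [ht, List.map_map, List.range_eq_range']
  refine List.map_congr_left ?_
  intro a _
  simp

-- ===== VERDICT (by name: the statement is the Claim_ definition above) =====
theorem display_doors_spec : Claim_equal_display_doors := by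
  intro doors revealed_door_nums _
  unfold Spec_display_doors display_doors display_doors_alt
  have hA := foldA_eq doors revealed_door_nums doors.length 0 []
  simp only [Nat.cast_zero, zero_add] at hA
  have hB := rowsGo_eq
      (fun j => cellB doors revealed_door_nums (decide (revealed_door_nums.length < doors.length)) (j : Int))
      (fun j => cellB_ne_nil _ _ _ _) doors.length 0 (by omega)
  simp only [hA, List.nil_append, cells_eq, hB]
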